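-- pv_equiv track=rewrite | github.com/sidddataanalytics/python_learning_journey | Day8/lovecalculator.py | calculate_love_score
-- ===== SOURCE A (Python) =====
-- def calculate_love_score(name1, name2):
--     combined_names = name1 + name2
--     lower_case_names = combined_names.lower()
--
--     true_count = sum(lower_case_names.count(letter) for letter in "true")
--     love_count = sum(lower_case_names.count(letter) for letter in "love")
--
--     love_score = int(str(true_count) + str(love_count))
--
--     if love_score < 10 or love_score > 90:
--         return f"Your love score is {love_score}, you go together like coke and mentos."
--     elif 40 <= love_score <= 50:
--         return f"Your love score is {love_score}, you are alright together."
--     else: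
--         return f"Your love score is {love_score}."
-- ===== SOURCE B (Python) =====
-- def calculate_love_score(name1, name2):
--     true_count = 0
--     love_count = 0
--     for c in (name1 + name2).lower():
--         if c in "true":
--             true_count += 1
--         if c in "love":
--             love_count += 1
--
--     love_score = int(str(true_count) + str(love_count))
--
--     if love_score < 10 or love_score > 90:
--         return f"Your love score is {love_score}, you go together like coke and mentos."
--     if 40 <= love_score <= 50:
--         return f"Your love score is {love_score}, you are alright together."
--     return f"Your love score is {love_score}."
-- ===== Notes on version B (the rewrite author's own statement) =====
-- stated objective: simpler
-- what changed: Replaces the eight separate str.count scans (one per letter of 'true' and 'love') with a single forward pass over the lowercased combined name maintaining two counters.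
import Mathlib
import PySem

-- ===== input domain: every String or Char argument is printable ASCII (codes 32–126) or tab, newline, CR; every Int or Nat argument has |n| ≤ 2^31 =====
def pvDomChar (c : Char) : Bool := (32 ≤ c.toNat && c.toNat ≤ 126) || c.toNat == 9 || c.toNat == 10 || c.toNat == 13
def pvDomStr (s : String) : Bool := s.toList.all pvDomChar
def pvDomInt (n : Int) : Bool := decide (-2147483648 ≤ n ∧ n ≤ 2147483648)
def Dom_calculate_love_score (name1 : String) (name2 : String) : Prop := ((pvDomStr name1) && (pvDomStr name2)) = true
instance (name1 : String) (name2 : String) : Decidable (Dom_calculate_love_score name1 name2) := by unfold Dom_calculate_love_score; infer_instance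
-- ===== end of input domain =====

-- B replaces A's eight per-letter str.count scans with one pass over the lowercased
-- combined name keeping two counters (objective: simpler).

-- ===== PORT A =====
-- int(str(tc)+str(lc)) always parses (both counts are nonnegative decimal numerals), so .getD 0 is never taken.
def calculate_love_score (name1 : String) (name2 : String) : String :=
  let combined_names := name1 ++ name2
  let lower_case_names := PySem.Str.lower combined_names
  let true_count : Int :=
    (("true".toList).map (fun letter => (PySem.Str.count lower_case_names (String.ofList [letter]) : Int))).sum
  let love_count : Int :=
    (("love".toList).map (fun letter => (PySem.Str.count lower_case_names (String.ofList [letter]) : Int))).sum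
  let love_score : Int :=
    (PySem.Int.ofStr? (PySem.Int.toStr true_count ++ PySem.Int.toStr love_count)).getD 0
  if love_score < 10 || love_score > 90 then
    "Your love score is " ++ PySem.Int.toStr love_score ++ ", you go together like coke and mentos."
  else if 40 ≤ love_score && love_score ≤ 50 then
    "Your love score is " ++ PySem.Int.toStr love_score ++ ", you are alright together."
  else
    "Your love score is " ++ PySem.Int.toStr love_score ++ "."

-- ===== PORT B =====
def calculate_love_score_alt (name1 : String) (name2 : String) : String :=
  let counts : Int × Int :=
    (PySem.Str.lower (name1 ++ name2)).toList.foldl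
      (fun (acc : Int × Int) c =>
        (if PySem.Str.isIn (String.ofList [c]) "true" then acc.1 + 1 else acc.1,
         if PySem.Str.isIn (String.ofList [c]) "love" then acc.2 + 1 else acc.2))
      (0, 0)
  let love_score : Int :=
    (PySem.Int.ofStr? (PySem.Int.toStr counts.1 ++ PySem.Int.toStr counts.2)).getD 0
  if love_score < 10 || love_score > 90 then
    "Your love score is " ++ PySem.Int.toStr love_score ++ ", you go together like coke and mentos."
  else if 40 ≤ love_score && love_score ≤ 50 then
    "Your love score is " ++ PySem.Int.toStr love_score ++ ", you are alright together."
  else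
    "Your love score is " ++ PySem.Int.toStr love_score ++ "."

-- ===== PRECONDITION & SPEC =====
def Spec_calculate_love_score (name1 : String) (name2 : String) (out : String) : Prop := out = calculate_love_score_alt name1 name2
instance (name1 : String) (name2 : String) (out : String) : Decidable (Spec_calculate_love_score name1 name2 out) := by unfold Spec_calculate_love_score; infer_instance

-- ===== CLAIM (what is proved, stated in full; the proofs are below) =====
def Claim_equal_calculate_love_score : Prop := ∀ (name1 : String) (name2 : String), Dom_calculate_love_score name1 name2 → Spec_calculate_love_score name1 name2 (calculate_love_score name1 name2)

-- ===== LEMMAS AND PROOFS =====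

-- substring count of a single-character needle is the plain character count
lemma count_go_singleton (c : Char) : ∀ (l : List Char) (fuel acc : Nat), l.length ≤ fuel →
    PySem.Chars.count.go [c] fuel l acc = acc + l.count c := by
  intro l
  induction l with
  | nil => intro fuel acc _; cases fuel <;> simp [PySem.Chars.count.go]
  | cons h t ih =>
    intro fuel acc hle
    cases fuel with
    | zero => simp at hle
    | succ f =>
      simp only [List.length_cons, Nat.succ_le_succ_iff] at hle
      by_cases hc : h = c
      · subst hc
        have hpre : [h].isPrefixOf (h :: t) = true := by simp [List.isPrefixOf]
        simp [PySem.Chars.count.go, hpre, ih f (acc + 1) hle]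
        omega
      · have hpre : [c].isPrefixOf (h :: t) = false := by
          simp [List.isPrefixOf]; exact fun hh => (hc hh.symm).elim
        simp [PySem.Chars.count.go, hpre, ih f acc hle, hc]

lemma count_singleton (l : List Char) (c : Char) :
    PySem.Chars.count l [c] = l.count c := by
  simp [PySem.Chars.count, count_go_singleton c l l.length 0 le_rfl]

-- 'c in w' for a one-character string is membership in w's characters
lemma isIn_singleton (c : Char) (w : String) :
    PySem.Str.isIn (String.ofList [c]) w = decide (c ∈ w.toList) := by
  rw [PySem.Str.isIn_eq]
  have hl : (String.ofList [c]).toList = [c] := by simp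
  rw [hl]
  by_cases h : c ∈ w.toList
  · rw [(PySem.Chars.isIn_iff_infix [c] w.toList).2, decide_eq_true h]
    obtain ⟨s, t, hw⟩ := List.append_of_mem h
    rw [hw]
    exact ⟨s, t, by simp⟩
  · rw [(PySem.Chars.isIn_eq_false_iff [c] w.toList).2, decide_eq_false h]
    intro hinf
    exact h (hinf.subset (List.mem_singleton_self c))

-- a disjunction of disjoint tests counts additively
lemma countP_or_disjoint {α : Type} (p q : α → Bool) (xs : List α)
    (h : ∀ x, p x = true → q x = false) :
    xs.countP (fun c => p c || q c) = xs.countP p + xs.countP q := by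
  induction xs with
  | nil => simp
  | cons x l ih =>
    simp only [List.countP_cons, ih]
    by_cases hp : p x = true
    · simp [hp, h x hp]
      omega
    · simp only [Bool.not_eq_true] at hp
      cases hq : q x <;> simp [hp, hq] <;> try omega

-- the per-letter counts of A sum to B's single-pass membership count (letters pairwise distinct)
lemma countP_word (l : List Char) (w : List Char) (hw : w.Nodup) :
    l.countP (fun c => decide (c ∈ w)) = (w.map (fun letter => l.count letter)).sum := by
  induction w with
  | nil => simp
  | cons a t ih =>
    simp only [List.nodup_cons] at hw
    have hpred : (fun c => decide (c ∈ a :: t)) = (fun c => (c == a) || decide (c ∈ t)) := by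
      funext c
      by_cases hc : c = a <;> simp [hc]
    have hdisj : ∀ x, (x == a) = true → decide (x ∈ t) = false := by
      intro x hx
      rw [beq_iff_eq] at hx
      subst hx
      exact decide_eq_false hw.1
    have hcnt : l.countP (fun c => c == a) = l.count a := rfl
    rw [hpred, countP_or_disjoint _ _ _ hdisj, hcnt, ih hw.2, List.map_cons, List.sum_cons]

-- a single pass with two counters computes the two predicate counts
lemma foldl_two_counts (pT pL : Char → Bool) (l : List Char) : ∀ (a b : Int),
    l.foldl (fun (acc : Int × Int) c =>
        (if pT c then acc.1 + 1 else acc.1, if pL c then acc.2 + 1 else acc.2)) (a, b)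
      = (a + l.countP pT, b + l.countP pL) := by
  induction l with
  | nil => intro a b; simp
  | cons x xs ih =>
    intro a b
    simp only [List.foldl_cons, List.countP_cons]
    rw [ih]
    by_cases h1 : pT x <;> by_cases h2 : pL x <;>
      simp [h1, h2, Prod.ext_iff] <;> omega

lemma fold_pair_eq (l : List Char) :
    l.foldl (fun (acc : Int × Int) c =>
        (if PySem.Str.isIn (String.ofList [c]) "true" then acc.1 + 1 else acc.1,
         if PySem.Str.isIn (String.ofList [c]) "love" then acc.2 + 1 else acc.2)) (0, 0)
      = ((("true".toList).map (fun letter => (l.count letter : Int))).sum,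
         (("love".toList).map (fun letter => (l.count letter : Int))).sum) := by
  rw [foldl_two_counts (fun c => PySem.Str.isIn (String.ofList [c]) "true")
        (fun c => PySem.Str.isIn (String.ofList [c]) "love") l 0 0]
  have hT : l.countP (fun c => PySem.Str.isIn (String.ofList [c]) "true")
      = l.countP (fun c => decide (c ∈ "true".toList)) := by
    apply List.countP_congr; intro x _; rw [isIn_singleton]
  have hL : l.countP (fun c => PySem.Str.isIn (String.ofList [c]) "love")
      = l.countP (fun c => decide (c ∈ "love".toList)) := by
    apply List.countP_congr; intro x _; rw [isIn_singleton]
  rw [hT, hL, countP_word l "true".toList (by decide), countP_word l "love".toList (by decide)]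
  simp only [Prod.mk.injEq, zero_add]
  constructor <;> · push_cast [List.map_map]; simp [Function.comp]

-- ===== VERDICT (by name: the statement is the Claim_ definition above) =====
theorem calculate_love_score_spec : Claim_equal_calculate_love_score := by
  intro name1 name2 _
  unfold Spec_calculate_love_score calculate_love_score calculate_love_score_alt
  have hmk : ∀ (letter : Char), (String.ofList [letter]).toList = [letter] := by simp
  simp only [fold_pair_eq, PySem.Str.count_eq, hmk, count_singleton]
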